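-- pv_equiv track=rewrite | github.com/AriusLee/orionmano-api | app/services/agent/memory.py | _trim_to_budget
-- ===== SOURCE A (Python) =====
-- CHARS_PER_TOKEN = 4
--
-- def _estimate_tokens(text: str) -> int:
--     return len(text) // CHARS_PER_TOKEN
--
-- def _trim_to_budget(rules: list[str], max_tokens: int) -> list[str]:
--     """Keep as many rules as fit within the token budget."""
--     result = []
--     used = 0
--     for rule in rules:
--         cost = _estimate_tokens(rule)
--         if used + cost > max_tokens:
--             break
--         result.append(rule)
--         used += cost
--     return result
-- ===== SOURCE B (Python) =====
-- CHARS_PER_TOKEN = 4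
--
-- def _trim_to_budget(rules, max_tokens):
--     """Prefix-sum table of token costs + binary search for the cutoff."""
--     cums = []
--     total = 0
--     for rule in rules:
--         total += len(rule) // CHARS_PER_TOKEN
--         cums.append(total)
--     lo, hi = 0, len(cums)
--     while lo < hi:
--         mid = (lo + hi) // 2
--         if cums[mid] <= max_tokens:
--             lo = mid + 1
--         else:
--             hi = mid
--     return rules[:lo]
-- ===== Notes on version B (the rewrite author's own statement) =====
-- stated objective: alternative
-- what changed: Replaced the greedy accumulate-and-break loop by building a prefix-sum table of per-rule token costs and binary-searching it for the largest within-budget prefix, returning rules[:k].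
import Mathlib
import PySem

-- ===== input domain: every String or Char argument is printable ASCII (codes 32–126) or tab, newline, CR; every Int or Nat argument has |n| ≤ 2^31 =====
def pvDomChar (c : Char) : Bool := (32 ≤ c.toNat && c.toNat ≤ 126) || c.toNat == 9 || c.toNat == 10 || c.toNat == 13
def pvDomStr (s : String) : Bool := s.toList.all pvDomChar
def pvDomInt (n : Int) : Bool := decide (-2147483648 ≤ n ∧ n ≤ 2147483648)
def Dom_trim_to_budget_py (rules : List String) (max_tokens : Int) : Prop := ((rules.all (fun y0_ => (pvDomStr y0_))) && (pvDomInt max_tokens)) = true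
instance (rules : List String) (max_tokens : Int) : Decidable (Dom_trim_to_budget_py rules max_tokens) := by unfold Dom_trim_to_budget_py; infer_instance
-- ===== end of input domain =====

-- B replaces A's accumulate-and-break loop by a prefix-sum table plus binary search (alternative decomposition, same asymptotic cost).


-- ===== PORT A =====
-- _estimate_tokens(text) = len(text) // CHARS_PER_TOKEN
def estimate_tokens_py (text : String) : Int :=
  PySem.Int.floordiv (PySem.Str.len text) 4

-- A's loop: result/used accumulator with break
def trimGoA (rules : List String) (max_tokens : Int) (used : Int) : List String :=
  match rules with
  | [] => []
  | r :: rest =>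
    let cost := estimate_tokens_py r
    if used + cost > max_tokens then []
    else r :: trimGoA rest max_tokens (used + cost)

def trim_to_budget_py (rules : List String) (max_tokens : Int) : List String :=
  trimGoA rules max_tokens 0

-- ===== PORT B =====
-- B's first loop: build the prefix-sum table of per-rule costs
def cumsB (rules : List String) (total : Int) : List Int :=
  match rules with
  | [] => []
  | r :: rest =>
    let t := total + PySem.Int.floordiv (PySem.Str.len r) 4
    t :: cumsB rest t

-- B's while loop: binary search (lo, hi) on the table; index always in range, getD is exact
def bsearchB (cums : List Int) (x : Int) (lo hi : Nat) : Nat :=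
  if _h : lo < hi then
    let mid := (lo + hi) / 2
    if cums.getD mid 0 ≤ x then bsearchB cums x (mid + 1) hi
    else bsearchB cums x lo mid
  else lo
termination_by hi - lo
decreasing_by all_goals omega

def trim_to_budget_py_alt (rules : List String) (max_tokens : Int) : List String :=
  let cums := cumsB rules 0
  rules.take (bsearchB cums max_tokens 0 cums.length)   -- rules[:lo], lo ≥ 0

-- ===== PRECONDITION & SPEC =====
def Spec_trim_to_budget_py (rules : List String) (max_tokens : Int) (out : List String) : Prop := out = trim_to_budget_py_alt rules max_tokens
instance (rules : List String) (max_tokens : Int) (out : List String) : Decidable (Spec_trim_to_budget_py rules max_tokens out) := by unfold Spec_trim_to_budget_py; infer_instance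

-- ===== CLAIM (what is proved, stated in full; the proofs are below) =====
def Claim_equal_trim_to_budget_py : Prop := ∀ (rules : List String) (max_tokens : Int), Dom_trim_to_budget_py rules max_tokens → Spec_trim_to_budget_py rules max_tokens (trim_to_budget_py rules max_tokens)

-- ===== LEMMAS AND PROOFS =====

-- each per-rule cost is nonnegative
theorem cost_nonneg (r : String) : 0 ≤ PySem.Int.floordiv (PySem.Str.len r) 4 := by
  rw [PySem.Int.floordiv_eq_ediv_of_pos (by norm_num)]
  exact Int.ediv_nonneg (by simp [PySem.Str.len_eq]) (by norm_num)

-- every prefix sum is at least the starting total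
theorem cumsB_le (rules : List String) (total : Int) :
    ∀ y ∈ cumsB rules total, total ≤ y := by
  induction rules generalizing total with
  | nil => simp [cumsB]
  | cons r rest ih =>
    intro y hy
    simp only [cumsB, List.mem_cons] at hy
    have hc := cost_nonneg r
    rcases hy with h | h
    · omega
    · have := ih (total + PySem.Int.floordiv (PySem.Str.len r) 4) y h; omega

-- the prefix-sum table is nondecreasing
theorem cumsB_sorted (rules : List String) (total : Int) :
    List.Pairwise (fun a b => a ≤ b) (cumsB rules total) := by
  induction rules generalizing total with
  | nil => simp [cumsB]
  | cons r rest ih =>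
    simp only [cumsB]
    exact List.Pairwise.cons (fun y hy => cumsB_le _ _ y hy) (ih _)

-- countP of a "≤ x" split point in a sorted-characterised list is the split point
theorem countP_eq_of_split (cums : List Int) (x : Int) (k : Nat) (hk : k ≤ cums.length)
    (h1 : ∀ j (hj : j < cums.length), j < k → cums[j] ≤ x)
    (h2 : ∀ j (hj : j < cums.length), k ≤ j → x < cums[j]) :
    cums.countP (fun c => decide (c ≤ x)) = k := by
  induction cums generalizing k with
  | nil => simp only [List.countP_nil, List.length_nil] at hk ⊢; omega
  | cons c cs ih =>
    cases k with
    | zero =>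
      have hall : ∀ y ∈ c :: cs, ¬ (y ≤ x) := by
        intro y hy
        obtain ⟨j, hj, rfl⟩ := List.getElem_of_mem hy
        exact fun h => absurd h (not_le.mpr (h2 j hj (Nat.zero_le j)))
      simp only [List.countP_eq_zero]
      intro y hy; simpa using hall y hy
    | succ k' =>
      have hc : c ≤ x := h1 0 (by simp) (Nat.succ_pos _)
      have : cs.countP (fun c => decide (c ≤ x)) = k' := by
        apply ih k' (by simpa using hk)
        · intro j hj hjk
          exact h1 (j+1) (by simpa using hj) (by omega)
        · intro j hj hjk
          exact h2 (j+1) (by simpa using hj) (by omega)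
      simp [List.countP_cons, hc, this]

-- the binary search computes the countP of the sorted table
theorem bsearchB_eq_countP (cums : List Int) (x : Int)
    (hs : List.Pairwise (fun a b => a ≤ b) cums) :
    ∀ lo hi, lo ≤ hi → hi ≤ cums.length →
      (∀ j (hj : j < cums.length), j < lo → cums[j] ≤ x) →
      (∀ j (hj : j < cums.length), hi ≤ j → x < cums[j]) →
      bsearchB cums x lo hi = cums.countP (fun c => decide (c ≤ x)) := by
  have hpair : ∀ i j (hi : i < cums.length) (hj : j < cums.length), i < j → cums[i] ≤ cums[j] := by
    intro i j hi hj hij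
    exact List.pairwise_iff_getElem.mp hs i j hi hj hij
  intro lo hi
  induction hlh : hi - lo using Nat.strong_induction_on generalizing lo hi with
  | _ n ih =>
    intro hle hhi h1 h2
    rw [bsearchB]
    by_cases hlt : lo < hi
    · simp only [hlt, dif_pos]
      have hmidlt : (lo + hi) / 2 < cums.length := by omega
      have hgetD : cums.getD ((lo + hi) / 2) 0 = cums[(lo + hi) / 2] := List.getD_eq_getElem _ _ hmidlt
      by_cases hm : cums.getD ((lo + hi) / 2) 0 ≤ x
      · simp only [hm, if_pos]
        apply ih (hi - ((lo + hi) / 2 + 1)) (by omega) _ _ rfl (by omega) hhi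
        · intro j hj hjlt
          rcases Nat.lt_or_ge j ((lo + hi) / 2) with h | h
          · exact le_trans (hpair j _ hj hmidlt h) (hgetD ▸ hm)
          · have : j = (lo + hi) / 2 := by omega
            subst this; exact hgetD ▸ hm
        · exact h2
      · simp only [hm, if_neg, if_false]
        push_neg at hm
        rw [hgetD] at hm
        apply ih ((lo + hi) / 2 - lo) (by omega) _ _ rfl (by omega) (by omega) h1
        intro j hj hjge
        rcases Nat.lt_or_ge ((lo + hi) / 2) j with h | h
        · exact lt_of_lt_of_le hm (hpair _ j hmidlt hj h)
        · have : j = (lo + hi) / 2 := by omega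
          subst this; exact hm
    · simp only [hlt, dif_neg, not_false_iff]
      have : lo = hi := by omega
      subst this
      exact (countP_eq_of_split cums x lo hhi (fun j hj hjk => h1 j hj hjk)
        (fun j hj hjk => h2 j hj hjk)).symm

-- A's loop equals take (countP of the prefix-sum table)
theorem trimGoA_eq_take (max_tokens : Int) (rules : List String) (used : Int) :
    trimGoA rules max_tokens used
      = rules.take ((cumsB rules used).countP (fun c => decide (c ≤ max_tokens))) := by
  induction rules generalizing used with
  | nil => rfl
  | cons r rest ih =>
    simp only [trimGoA, cumsB, estimate_tokens_py]
    set t := used + PySem.Int.floordiv (PySem.Str.len r) 4 with ht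
    by_cases hb : t > max_tokens
    · simp only [hb, if_pos]
      have hzero : (t :: cumsB rest t).countP (fun c => decide (c ≤ max_tokens)) = 0 := by
        rw [List.countP_eq_zero]
        intro y hy
        simp only [List.mem_cons] at hy
        rcases hy with rfl | hy
        · simpa using hb
        · have := cumsB_le rest t y hy
          simp only [decide_eq_true_eq]; omega
      rw [hzero]; rfl
    · simp only [hb, if_neg, not_false_iff, if_false]
      push_neg at hb
      have : (t :: cumsB rest t).countP (fun c => decide (c ≤ max_tokens))
          = (cumsB rest t).countP (fun c => decide (c ≤ max_tokens)) + 1 := by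
        simp [hb]
      rw [this, List.take_succ_cons, ih]

-- ===== VERDICT (by name: the statement is the Claim_ definition above) =====
theorem trim_to_budget_py_spec : Claim_equal_trim_to_budget_py := by
  intro rules max_tokens _
  unfold Spec_trim_to_budget_py trim_to_budget_py trim_to_budget_py_alt
  rw [trimGoA_eq_take]
  congr 1
  exact (bsearchB_eq_countP (cumsB rules 0) max_tokens (cumsB_sorted rules 0)
    0 (cumsB rules 0).length (Nat.zero_le _) le_rfl
    (fun j hj hjk => absurd hjk (Nat.not_lt_zero j))
    (fun j hj hjk => absurd hj (by omega))).symm
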